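-- pv_equiv track=rewrite | github.com/as2931543asd/MLstudy | Tensor.py | find_subphrase
-- ===== SOURCE A (Python) =====
-- def find_subphrase(find_list, target_list):
--     for j in range(len(find_list)):
--         ngram = creat_ngram(find_list, j + 1)
--         for gram in ngram:
--             if gram in target_list:
--                 if find_list == gram:
--                     pass
--                 else:
--                     return gram
--     return None
--
-- def creat_ngram(crate_list, n):
--     result = []
--     end = len(crate_list)
--     if n > end:
--         return None
--     else:
--         for i in range(end - n + 1):
--             result.append(crate_list[i:i + n])
--         return result
-- ===== SOURCE B (Python) =====
-- # B: drive the search over target_list: for each target element locate its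
-- # leftmost occurrence as a window of find_list and keep the (length, start)-
-- # minimal candidate, instead of generating every n-gram and testing membership.
--
-- def _leftmost(find_list, t):
--     m = len(t)
--     for i in range(len(find_list) - m + 1):
--         if find_list[i:i + m] == t:
--             return i
--     return None
--
-- def find_subphrase(find_list, target_list):
--     n = len(find_list)
--     best = None
--     for t in target_list:
--         if not isinstance(t, list):
--             continue
--         m = len(t)
--         if m < 1 or m >= n:
--             continue
--         i = _leftmost(find_list, t)
--         if i is not None:
--             cand = (m, i)
--             if best is None or cand < best:
--                 best = cand
--     if best is None:
--         return None
--     m, i = best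
--     return find_list[i:i + m]
-- ===== Notes on version B (the rewrite author's own statement) =====
-- stated objective: alternative
-- what changed: B iterates over target_list, locating each element's leftmost occurrence as a contiguous window of find_list and keeping the (length,start)-lexicographically minimal candidate, instead of A's generation of every n-gram of find_list with a membership test against target_list.
import Mathlib
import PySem

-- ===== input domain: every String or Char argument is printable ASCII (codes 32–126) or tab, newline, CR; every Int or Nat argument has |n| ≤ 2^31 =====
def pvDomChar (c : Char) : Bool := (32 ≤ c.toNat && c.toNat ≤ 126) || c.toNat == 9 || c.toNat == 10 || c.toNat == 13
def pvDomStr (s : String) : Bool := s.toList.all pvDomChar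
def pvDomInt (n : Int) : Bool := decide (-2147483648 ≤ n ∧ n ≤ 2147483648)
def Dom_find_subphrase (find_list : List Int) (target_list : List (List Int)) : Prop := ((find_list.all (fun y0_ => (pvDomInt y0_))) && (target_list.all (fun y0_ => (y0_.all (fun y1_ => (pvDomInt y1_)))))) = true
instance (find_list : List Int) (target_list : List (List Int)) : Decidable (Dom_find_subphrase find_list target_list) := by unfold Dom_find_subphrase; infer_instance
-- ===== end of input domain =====

-- B replaces A's "enumerate every n-gram of find_list and test membership in target_list"
-- by "for each target element, locate its leftmost window in find_list and keep the
-- (length, start)-minimal candidate" (objective: alternative algorithm, same result).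

-- ===== PORT A =====
def creat_ngram (crate_list : List Int) (n : Nat) : Option (List (List Int)) :=
  let e := crate_list.length
  if n > e then none
  else some ((List.range (e - n + 1)).map (fun (i : Nat) =>
    PySem.List.slice crate_list (some (i : Int)) (some ((i : Int) + (n : Int)))))

-- inner 'for gram in ngram' loop of A
def fsInner (find_list : List Int) (target_list : List (List Int)) :
    List (List Int) → Option (List Int)
  | [] => none
  | gram :: rest =>
    if gram ∈ target_list then
      if gram = find_list then fsInner find_list target_list rest
      else some gram
    else fsInner find_list target_list rest

-- outer 'for j in range(len(find_list))' loop of A; for j < len the creat_ngram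
-- call always returns some, so the .getD [] default is unreachable
def fsOuter (find_list : List Int) (target_list : List (List Int)) :
    List Nat → Option (List Int)
  | [] => none
  | j :: rest =>
    match fsInner find_list target_list ((creat_ngram find_list (j + 1)).getD []) with
    | some g => some g
    | none => fsOuter find_list target_list rest

def find_subphrase (find_list : List Int) (target_list : List (List Int)) : Option (List Int) :=
  fsOuter find_list target_list (List.range find_list.length)

-- ===== PORT B =====
-- Python tuple comparison (m, i) < (m', i')
def pairLt (a b : Nat × Nat) : Bool := decide (a.1 < b.1) || (a.1 == b.1 && decide (a.2 < b.2))

-- _leftmost of Source B: first i with find_list[i:i+len(t)] == t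
def leftmost (find_list t : List Int) : Option Nat :=
  (List.range (find_list.length - t.length + 1)).find?
    (fun (i : Nat) => PySem.List.slice find_list (some (i : Int)) (some ((i : Int) + (t.length : Int))) == t)

-- loop body of Source B (the isinstance(t, list) guard is vacuous under the typing List (List Int))
def bStep (find_list : List Int) (best : Option (Nat × Nat)) (t : List Int) : Option (Nat × Nat) :=
  let n := find_list.length
  let m := t.length
  if m < 1 ∨ n ≤ m then best
  else
    match leftmost find_list t with
    | none => best
    | some i =>
      let cand := (m, i)
      match best with
      | none => some cand
      | some b => if pairLt cand b then some cand else best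

def find_subphrase_alt (find_list : List Int) (target_list : List (List Int)) : Option (List Int) :=
  match target_list.foldl (bStep find_list) none with
  | none => none
  | some (m, i) => some (PySem.List.slice find_list (some (i : Int)) (some ((i : Int) + (m : Int))))

-- ===== PRECONDITION & SPEC =====
def Spec_find_subphrase (find_list : List Int) (target_list : List (List Int)) (out : Option (List Int)) : Prop := out = find_subphrase_alt find_list target_list
instance (find_list : List Int) (target_list : List (List Int)) (out : Option (List Int)) : Decidable (Spec_find_subphrase find_list target_list out) := by unfold Spec_find_subphrase; infer_instance

-- ===== CLAIM (what is proved, stated in full; the proofs are below) =====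
def Claim_equal_find_subphrase : Prop := ∀ (find_list : List Int) (target_list : List (List Int)), Dom_find_subphrase find_list target_list → Spec_find_subphrase find_list target_list (find_subphrase find_list target_list)

-- ===== LEMMAS AND PROOFS =====

-- window of find_list of length m starting at i
def win (fl : List Int) (m i : Nat) : List Int := (fl.drop i).take m

-- the candidate pairs both programs select among
def Sel (fl : List Int) (ts : List (List Int)) (p : Nat × Nat) : Prop :=
  1 ≤ p.1 ∧ p.1 < fl.length ∧ p.2 + p.1 ≤ fl.length ∧ win fl p.1 p.2 ∈ ts

-- strict lexicographic order on (length, start)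
def LexLt (p q : Nat × Nat) : Prop := p.1 < q.1 ∨ (p.1 = q.1 ∧ p.2 < q.2)

-- r is (the) lexicographic minimum of S (none iff S is empty)
def OMin (S : Nat × Nat → Prop) (r : Option (Nat × Nat)) : Prop :=
  match r with
  | none => ∀ p, ¬ S p
  | some q => S q ∧ ∀ p, S p → ¬ LexLt p q

theorem oMin_none {S : Nat × Nat → Prop} (h : ∀ p, ¬ S p) : OMin S none := h

theorem oMin_congr {S T : Nat × Nat → Prop} {r : Option (Nat × Nat)}
    (hiff : ∀ p, S p ↔ T p) (h : OMin S r) : OMin T r := by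
  cases r with
  | none => exact fun p hp => h p ((hiff p).2 hp)
  | some q => exact ⟨(hiff q).1 h.1, fun p hp => h.2 p ((hiff p).2 hp)⟩

theorem oMin_unique {S : Nat × Nat → Prop} {r r' : Option (Nat × Nat)}
    (h : OMin S r) (h' : OMin S r') : r = r' := by
  cases r with
  | none =>
    cases r' with
    | none => rfl
    | some q => exact absurd h'.1 (h q)
  | some q =>
    cases r' with
    | none => exact absurd h.1 (h' q)
    | some q' =>
      have h1 := h.2 q' h'.1
      have h2 := h'.2 q h.1
      simp only [LexLt, not_or, not_and] at h1 h2
      obtain ⟨m, i⟩ := q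
      obtain ⟨m', i'⟩ := q'
      simp only [Option.some_inj, Prod.mk.injEq]
      omega

theorem slice_win (fl : List Int) (i m : Nat) :
    PySem.List.slice fl (some (i : Int)) (some ((i : Int) + (m : Int))) = win fl m i :=
  PySem.List.slice_natCast_add fl i m

theorem win_length (fl : List Int) (m i : Nat) (h : i + m ≤ fl.length) :
    (win fl m i).length = m := by
  simp [win]
  omega

theorem win_full (fl : List Int) : win fl fl.length 0 = fl := by
  simp [win]

-- find? on a pairwise-sorted list returns a minimal satisfying element
theorem find?_sorted {α : Type} {R : α → α → Prop} {p : α → Bool} :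
    ∀ {l : List α}, l.Pairwise R → ∀ {q : α}, l.find? p = some q →
      ∀ x ∈ l, p x = true → x = q ∨ R q x := by
  intro l
  induction l with
  | nil => intro _ q h; simp at h
  | cons a l ih =>
    intro hp q hf x hx hpx
    obtain ⟨ha, hl⟩ := List.pairwise_cons.1 hp
    rw [List.find?_cons] at hf
    by_cases hpa : p a = true
    · simp only [hpa] at hf
      injection hf with hf
      rcases List.mem_cons.1 hx with rfl | hx'
      · exact Or.inl hf
      · subst hf; exact Or.inr (ha x hx')
    · simp only [hpa] at hf
      rcases List.mem_cons.1 hx with rfl | hx'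
      · exact absurd hpx hpa
      · exact ih hl hf x hx' hpx

-- ---------- characterisation of A ----------

def hitb (fl : List Int) (tl : List (List Int)) (g : List Int) : Bool :=
  decide (g ∈ tl ∧ g ≠ fl)

theorem fsInner_eq (fl : List Int) (tl : List (List Int)) :
    ∀ l : List (List Int), fsInner fl tl l = l.find? (hitb fl tl) := by
  intro l
  induction l with
  | nil => rfl
  | cons g rest ih =>
    rw [fsInner, List.find?_cons]
    by_cases h1 : g ∈ tl
    · by_cases h2 : g = fl
      · simp [h2, hitb, ih]
      · simp [h1, h2, hitb]
    · simp [h1, hitb, ih]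

def lexPairs (n : Nat) : List (Nat × Nat) :=
  (List.range n).flatMap (fun j => (List.range (n - j)).map (fun i => (j + 1, i)))

theorem lexPairs_pairwise (n : Nat) : (lexPairs n).Pairwise LexLt := by
  rw [lexPairs, List.pairwise_flatMap]
  constructor
  · intro j _
    rw [List.pairwise_map]
    exact List.pairwise_lt_range.imp (fun h => Or.inr ⟨rfl, h⟩)
  · refine List.pairwise_lt_range.imp ?_
    intro j₁ j₂ hlt x hx y hy
    simp only [List.mem_map, List.mem_range] at hx hy
    obtain ⟨i₁, _, rfl⟩ := hx
    obtain ⟨i₂, _, rfl⟩ := hy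
    exact Or.inl (by omega)

theorem mem_lexPairs {n : Nat} {p : Nat × Nat} :
    p ∈ lexPairs n ↔ 1 ≤ p.1 ∧ p.1 ≤ n ∧ p.2 + p.1 ≤ n := by
  obtain ⟨m, i⟩ := p
  simp only [lexPairs, List.mem_flatMap, List.mem_map, List.mem_range, Prod.mk.injEq]
  constructor
  · rintro ⟨j, hj, i', hi', rfl, rfl⟩
    omega
  · rintro ⟨h1, h2, h3⟩
    exact ⟨m - 1, by omega, i, by omega, by omega, rfl⟩

theorem A_char (fl : List Int) (tl : List (List Int)) :
    find_subphrase fl tl =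
      ((lexPairs fl.length).find? (fun p => hitb fl tl (win fl p.1 p.2))).map
        (fun p => win fl p.1 p.2) := by
  rw [find_subphrase, lexPairs]
  have key : ∀ js : List Nat, (∀ j ∈ js, j < fl.length) →
      fsOuter fl tl js =
        ((js.flatMap (fun j => (List.range (fl.length - j)).map (fun i => (j + 1, i)))).find?
          (fun p => hitb fl tl (win fl p.1 p.2))).map (fun p => win fl p.1 p.2) := by
    intro js
    induction js with
    | nil => intro _; rfl
    | cons j rest ih =>
      intro hb
      have hj : j < fl.length := hb j (List.mem_cons_self ..)
      rw [fsOuter, List.flatMap_cons, List.find?_append]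
      have hng : (creat_ngram fl (j + 1)).getD [] =
          (List.range (fl.length - j)).map (fun i => win fl (j + 1) i) := by
        rw [creat_ngram]
        simp only [if_neg (by omega : ¬ j + 1 > fl.length), Option.getD_some]
        have he : fl.length - (j + 1) + 1 = fl.length - j := by omega
        rw [he]
        exact List.map_congr_left (fun i _ => slice_win fl i (j + 1))
      rw [fsInner_eq, hng, List.find?_map, List.find?_map]
      have hcomp : ((hitb fl tl) ∘ (fun i => win fl (j + 1) i)) =
          ((fun p => hitb fl tl (win fl p.1 p.2)) ∘ (fun i => ((j + 1 : Nat), i))) := rfl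
      rw [hcomp]
      cases hfind : (List.range (fl.length - j)).find?
          ((fun p => hitb fl tl (win fl p.1 p.2)) ∘ (fun i => ((j + 1 : Nat), i))) with
      | some i => simp
      | none =>
        simp only [Option.map_none, Option.none_or]
        exact ih (fun x hx => hb x (List.mem_cons_of_mem _ hx))
  exact key (List.range fl.length) (by simp)

-- a hit pair (within bounds) is exactly a Sel pair: its length cannot be the full length
theorem hit_iff_sel (fl : List Int) (tl : List (List Int)) (p : Nat × Nat)
    (hmem : 1 ≤ p.1 ∧ p.1 ≤ fl.length ∧ p.2 + p.1 ≤ fl.length) :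
    (hitb fl tl (win fl p.1 p.2) = true) ↔ Sel fl tl p := by
  obtain ⟨m, i⟩ := p
  obtain ⟨h1, h2, h3⟩ := hmem
  simp only [hitb, decide_eq_true_eq, Sel]
  constructor
  · rintro ⟨hin, hne⟩
    refine ⟨h1, ?_, h3, hin⟩
    rcases Nat.lt_or_ge m fl.length with h | h
    · exact h
    · exfalso
      have hm : m = fl.length := by omega
      have hi : i = 0 := by omega
      subst hm; subst hi
      exact hne (win_full fl)
  · rintro ⟨_, hlt, _, hin⟩
    refine ⟨hin, ?_⟩
    intro he
    have hwl := win_length fl m i h3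
    rw [he] at hwl
    omega

theorem A_oMin (fl : List Int) (tl : List (List Int)) :
    OMin (Sel fl tl) ((lexPairs fl.length).find? (fun p => hitb fl tl (win fl p.1 p.2))) := by
  cases hfind : (lexPairs fl.length).find? (fun p => hitb fl tl (win fl p.1 p.2)) with
  | none =>
    refine oMin_none ?_
    intro p hp
    have hmem : p ∈ lexPairs fl.length := mem_lexPairs.2 ⟨hp.1, Nat.le_of_lt hp.2.1, hp.2.2.1⟩
    have hnp := List.find?_eq_none.1 hfind p hmem
    exact hnp ((hit_iff_sel fl tl p ⟨hp.1, Nat.le_of_lt hp.2.1, hp.2.2.1⟩).2 hp)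
  | some q =>
    have hq : q ∈ lexPairs fl.length := List.mem_of_find?_eq_some hfind
    have hqb := List.find?_some hfind
    have hqm := mem_lexPairs.1 hq
    refine ⟨(hit_iff_sel fl tl q hqm).1 hqb, ?_⟩
    intro p hp hlt
    have hpm : 1 ≤ p.1 ∧ p.1 ≤ fl.length ∧ p.2 + p.1 ≤ fl.length := ⟨hp.1, Nat.le_of_lt hp.2.1, hp.2.2.1⟩
    have hpmem : p ∈ lexPairs fl.length := mem_lexPairs.2 hpm
    have hs := find?_sorted (lexPairs_pairwise fl.length) hfind p hpmem
      ((hit_iff_sel fl tl p hpm).2 hp)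
    obtain ⟨m, i⟩ := p
    obtain ⟨m', i'⟩ := q
    simp only [LexLt] at hlt
    rcases hs with hs | hs
    · simp only [Prod.mk.injEq] at hs; omega
    · simp only [LexLt] at hs; omega

-- ---------- characterisation of B ----------

theorem leftmost_some {fl t : List Int} {i : Nat} (hm : t.length ≤ fl.length)
    (h : leftmost fl t = some i) :
    i + t.length ≤ fl.length ∧ win fl t.length i = t ∧
      ∀ j, j + t.length ≤ fl.length → win fl t.length j = t → ¬ j < i := by
  rw [leftmost] at h
  have hmem := List.mem_of_find?_eq_some h
  have hpb := List.find?_some h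
  rw [List.mem_range] at hmem
  simp only [slice_win, beq_iff_eq] at hpb
  refine ⟨by omega, hpb, ?_⟩
  intro j hj hwj hlt
  have hjmem : j ∈ List.range (fl.length - t.length + 1) := List.mem_range.2 (by omega)
  have hs := find?_sorted List.pairwise_lt_range h j hjmem
    (by simp only [slice_win, beq_iff_eq]; exact hwj)
  rcases hs with rfl | hs <;> omega

theorem leftmost_none {fl t : List Int} (h : leftmost fl t = none) :
    ∀ j, j + t.length ≤ fl.length → win fl t.length j ≠ t := by
  rw [leftmost] at h
  intro j hj hwj
  have hjmem : j ∈ List.range (fl.length - t.length + 1) := List.mem_range.2 (by omega)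
  have hnp := List.find?_eq_none.1 h j hjmem
  simp only [slice_win, beq_iff_eq] at hnp
  exact hnp hwj

theorem sel_nil (fl : List Int) (p : Nat × Nat) : ¬ Sel fl [] p := by
  rintro ⟨_, _, _, h⟩; simp at h

theorem sel_cons (fl : List Int) (t : List Int) (ts : List (List Int)) (p : Nat × Nat) :
    Sel fl (t :: ts) p ↔ (Sel fl [t] p ∨ Sel fl ts p) := by
  simp only [Sel, List.mem_cons]
  tauto

theorem oMin_keep {S T : Nat × Nat → Prop} {acc : Option (Nat × Nat)}
    (hacc : OMin S acc) (hempty : ∀ p, ¬ T p) : OMin (fun p => S p ∨ T p) acc := by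
  cases acc with
  | none => exact oMin_none (fun p hp => hp.elim (hacc p) (hempty p))
  | some q =>
    exact ⟨Or.inl hacc.1, fun p hp hlt => hp.elim (fun h => hacc.2 p h hlt) (hempty p)⟩

theorem bStep_oMin {fl : List Int} {acc : Option (Nat × Nat)} {S : Nat × Nat → Prop}
    (hacc : OMin S acc) (t : List Int) :
    OMin (fun p => S p ∨ Sel fl [t] p) (bStep fl acc t) := by
  unfold bStep
  by_cases hguard : t.length < 1 ∨ fl.length ≤ t.length
  · rw [if_pos hguard]
    refine oMin_keep hacc ?_
    rintro p ⟨h1, h2, h3, h4⟩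
    simp only [List.mem_singleton] at h4
    have hwl := win_length fl p.1 p.2 h3
    rw [h4] at hwl
    omega
  · rw [if_neg hguard]
    rw [not_or] at hguard
    obtain ⟨hg1', hg2'⟩ := hguard
    have hg1 : 1 ≤ t.length := by omega
    have hg2 : t.length < fl.length := by omega
    cases hlm : leftmost fl t with
    | none =>
      refine oMin_keep hacc ?_
      rintro p ⟨h1, h2, h3, h4⟩
      simp only [List.mem_singleton] at h4
      have hwl := win_length fl p.1 p.2 h3
      have hp1 : p.1 = t.length := by rw [h4] at hwl; omega
      exact leftmost_none hlm p.2 (by omega) (hp1 ▸ h4)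
    | some i =>
      obtain ⟨hb1, hb2, hb3⟩ := leftmost_some (by omega) hlm
      have hcand : Sel fl [t] (t.length, i) := ⟨by omega, by omega, hb1, by simp [hb2]⟩
      have hcand_min : ∀ p, Sel fl [t] p → ¬ LexLt p (t.length, i) := by
        rintro ⟨m, j⟩ ⟨h1, h2, h3, h4⟩ hlt
        simp only [List.mem_singleton] at h4
        have hwl := win_length fl m j h3
        rw [h4] at hwl
        subst hwl
        rcases hlt with h | h
        · omega
        · obtain ⟨he, hi⟩ := h
          have hwt : win fl t.length j = t := h4
          exact hb3 j (by omega) hwt hi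
      cases acc with
      | none =>
        refine ⟨Or.inr hcand, ?_⟩
        intro p hp hlt
        rcases hp with hp | hp
        · exact hacc p hp
        · exact hcand_min p hp hlt
      | some b =>
        show OMin (fun p => S p ∨ Sel fl [t] p)
          (if pairLt (t.length, i) b = true then some (t.length, i) else some b)
        by_cases hlt : pairLt (t.length, i) b = true
        · rw [if_pos hlt]
          simp only [pairLt, Bool.or_eq_true, decide_eq_true_eq, Bool.and_eq_true,
            beq_iff_eq] at hlt
          refine ⟨Or.inr hcand, ?_⟩
          intro p hp hplt
          rcases hp with hp | hp
          · have hnb := hacc.2 p hp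
            obtain ⟨m, j⟩ := p
            obtain ⟨bm, bi⟩ := b
            simp only [LexLt, not_or, not_and] at hnb ⊢
            simp only [] at hlt
            rcases hplt with h | h <;> omega
          · exact hcand_min p hp hplt
        · rw [if_neg hlt]
          simp only [pairLt, Bool.or_eq_true, decide_eq_true_eq, Bool.and_eq_true,
            beq_iff_eq, not_or, not_and] at hlt
          refine ⟨Or.inl hacc.1, ?_⟩
          intro p hp hplt
          rcases hp with hp | hp
          · exact hacc.2 p hp hplt
          · have hnc := hcand_min p hp
            obtain ⟨m, j⟩ := p
            obtain ⟨bm, bi⟩ := b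
            simp only [LexLt, not_or, not_and] at hnc ⊢
            rcases hplt with h | h <;> omega

theorem B_oMin (fl : List Int) :
    ∀ (ts : List (List Int)) (acc : Option (Nat × Nat)) (S : Nat × Nat → Prop),
      OMin S acc → OMin (fun p => S p ∨ Sel fl ts p) (ts.foldl (bStep fl) acc) := by
  intro ts
  induction ts with
  | nil =>
    intro acc S hacc
    simp only [List.foldl_nil]
    exact oMin_keep hacc (sel_nil fl)
  | cons t ts ih =>
    intro acc S hacc
    rw [List.foldl_cons]
    have h1 := ih (bStep fl acc t) (fun p => S p ∨ Sel fl [t] p) (bStep_oMin hacc t)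
    refine oMin_congr ?_ h1
    intro p
    rw [sel_cons]
    tauto

-- ===== VERDICT (by name: the statement is the Claim_ definition above) =====
theorem find_subphrase_spec : Claim_equal_find_subphrase := by
  intro fl tl _
  unfold Spec_find_subphrase
  rw [A_char]
  have hA := A_oMin fl tl
  have hB0 : OMin (fun _ => False) (none : Option (Nat × Nat)) := oMin_none (fun p h => h)
  have hB := B_oMin fl tl none (fun _ => False) hB0
  have hB' : OMin (Sel fl tl) (tl.foldl (bStep fl) none) :=
    oMin_congr (fun p => by tauto) hB
  have heq := oMin_unique hA hB'
  rw [find_subphrase_alt, ← heq]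
  cases hfind : (lexPairs fl.length).find? (fun p => hitb fl tl (win fl p.1 p.2)) with
  | none => simp
  | some q =>
    obtain ⟨m, i⟩ := q
    simp [slice_win]
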